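-- pv_equiv track=rewrite | github.com/niltoncanto/aulas_python | MARATONA_2024-2/competicao_01/jogando_cartas_fora_1110_v1.py | jogar_cartas_fora
-- ===== SOURCE A (Python) =====
-- def jogar_cartas_fora(n):
--     fila = list(range(1, n + 1))  # Cria a fila de cartas de 1 a n
--     descartadas = []
--
--     while len(fila) > 1:
--         descartada = fila.pop(0)
--         descartadas.append(descartada)  # Remove e descarta a primeira carta
--         topo = fila.pop(0)
--         fila.append(topo)  # Move a próxima carta para o final da fila
--
--     return descartadas, fila[0]  # Retorna as cartas descartadas e a última carta
-- ===== SOURCE B (Python) =====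
-- def jogar_cartas_fora(n):
--     # One pass per round: discard a whole alternating half at once via slicing,
--     # with a phase flag carrying the rotation parity across odd-length rounds.
--     fila = list(range(1, n + 1))
--     descartadas = []
--     phase = True  # True: the first card of this round is discarded
--     while len(fila) > 1:
--         evens = fila[0::2]
--         odds = fila[1::2]
--         if phase:
--             descartadas += evens
--             nxt = odds
--         else:
--             descartadas += odds
--             nxt = evens
--         if len(fila) % 2 == 1:
--             phase = not phase
--         fila = nxt
--     return descartadas, fila[0]
-- ===== Notes on version B (the rewrite author's own statement) =====
-- stated objective: faster
-- what changed: Replaces the one-card-at-a-time queue simulation (two pop(0) per step, each O(n)) by whole-round processing: each round discards one alternating half via slicing and keeps the other, with a boolean phase flag that flips after odd-length rounds to carry the rotation parity.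
-- outside the precondition, e.g. on jogar_cartas_fora(0): A raises IndexError, B raises IndexError
import Mathlib
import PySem

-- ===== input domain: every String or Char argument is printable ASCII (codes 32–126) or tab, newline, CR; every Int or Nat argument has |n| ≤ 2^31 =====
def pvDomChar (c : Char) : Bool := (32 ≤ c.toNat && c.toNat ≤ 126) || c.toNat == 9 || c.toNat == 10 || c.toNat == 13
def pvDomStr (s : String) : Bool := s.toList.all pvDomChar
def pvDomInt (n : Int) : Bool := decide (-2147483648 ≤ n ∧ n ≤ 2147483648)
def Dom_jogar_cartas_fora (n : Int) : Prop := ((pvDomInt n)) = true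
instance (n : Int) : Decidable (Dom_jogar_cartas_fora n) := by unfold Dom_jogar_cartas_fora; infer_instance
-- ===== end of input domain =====

-- B replaces A's one-card-at-a-time queue simulation (pop(0) twice per step, O(n^2))
-- by whole-round alternating slices with a parity flag (O(n) total); return value only,
-- Pre_ excludes n ≤ 0 where A's fila[0] raises IndexError.

-- ===== PORT A =====
-- the while loop: pop two from the front, discard the first, append the second
def pvALoop (fila acc : List Int) : List Int × Int :=
  match fila with
  | a :: b :: t => pvALoop (t ++ [b]) (acc ++ [a])
  | _ => (acc, (PySem.List.pyGet? fila 0).getD 0)  -- fila[0]; getD unreachable under Pre_ (fila = [x])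
termination_by fila.length
decreasing_by simp

def jogar_cartas_fora (n : Int) : List Int × Int :=
  pvALoop (PySem.List.pyRange 1 (n + 1) 1) []

-- ===== PORT B =====
-- exact hand ports of the step-2 slices fila[0::2] / fila[1::2]
mutual
def pvEvens : List Int → List Int
  | [] => []
  | a :: t => a :: pvOdds t
def pvOdds : List Int → List Int
  | [] => []
  | _ :: t => pvEvens t
end

theorem pv_split_length (l : List Int) :
    (pvEvens l).length = (l.length + 1) / 2 ∧ (pvOdds l).length = l.length / 2 := by
  induction l with
  | nil => simp [pvEvens, pvOdds]
  | cons a t ih => simp [pvEvens, pvOdds]; omega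

def pvBLoop (fila : List Int) (phase : Bool) (acc : List Int) : List Int × Int :=
  match fila with
  | a :: b :: t =>
    let phase' := if (a :: b :: t).length % 2 == 1 then !phase else phase
    if phase then
      pvBLoop (pvOdds (a :: b :: t)) phase' (acc ++ pvEvens (a :: b :: t))
    else
      pvBLoop (pvEvens (a :: b :: t)) phase' (acc ++ pvOdds (a :: b :: t))
  | _ => (acc, (PySem.List.pyGet? fila 0).getD 0)
termination_by fila.length
decreasing_by
  · have := pv_split_length (a :: b :: t); simp at this ⊢; omega
  · have := pv_split_length (a :: b :: t); simp at this ⊢; omega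

def jogar_cartas_fora_alt (n : Int) : List Int × Int :=
  pvBLoop (PySem.List.pyRange 1 (n + 1) 1) true []

-- ===== PRECONDITION & SPEC =====
-- Pre_ excludes exactly n ≤ 0, where A's final fila[0] raises IndexError (empty fila)
def Pre_jogar_cartas_fora (n : Int) : Prop := 1 ≤ n
instance (n : Int) : Decidable (Pre_jogar_cartas_fora n) := by unfold Pre_jogar_cartas_fora; infer_instance
def pvWitness_jogar_cartas_fora : Int := 5

def Spec_jogar_cartas_fora (n : Int) (out : List Int × Int) : Prop := out = jogar_cartas_fora_alt n
instance (n : Int) (out : List Int × Int) : Decidable (Spec_jogar_cartas_fora n out) := by unfold Spec_jogar_cartas_fora; infer_instance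

-- ===== CLAIM (what is proved, stated in full; the proofs are below) =====
def Claim_equal_jogar_cartas_fora : Prop := ∀ (n : Int), Dom_jogar_cartas_fora n → Pre_jogar_cartas_fora n → Spec_jogar_cartas_fora n (jogar_cartas_fora n)

-- ===== LEMMAS AND PROOFS =====

theorem pv_cons2_evens (a b : Int) (t : List Int) :
    pvEvens (a :: b :: t) = a :: pvEvens t ∧ pvOdds (a :: b :: t) = b :: pvOdds t := by
  simp [pvEvens, pvOdds]

theorem pv_split_append (l : List Int) (x : Int) :
    (pvEvens (l ++ [x]) = if l.length % 2 = 0 then pvEvens l ++ [x] else pvEvens l) ∧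
    (pvOdds (l ++ [x]) = if l.length % 2 = 0 then pvOdds l else pvOdds l ++ [x]) := by
  induction l with
  | nil => simp [pvEvens, pvOdds]
  | cons a t ih =>
    simp only [List.cons_append, pvEvens, pvOdds, ih.1, ih.2, List.length_cons]
    constructor <;> split_ifs <;> simp_all <;> omega

theorem pv_round_even : ∀ (m : Nat) (l r acc : List Int), l.length = m → m % 2 = 0 →
    pvALoop (l ++ r) acc = pvALoop (r ++ pvOdds l) (acc ++ pvEvens l) := by
  intro m
  induction m using Nat.strong_induction_on with
  | _ m ih =>
    intro l r acc hl hm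
    match l with
    | [] => simp [pvEvens, pvOdds]
    | [a] => simp at hl; omega
    | a :: b :: t =>
      rw [List.cons_append, List.cons_append, pvALoop]
      have ht : t.length = m - 2 := by simp at hl; omega
      have hm2 : m - 2 < m := by simp at hl; omega
      have := ih (m - 2) hm2 t (r ++ [b]) (acc ++ [a]) ht (by omega)
      rw [show t ++ r ++ [b] = t ++ (r ++ [b]) by simp, this,
          (pv_cons2_evens a b t).1, (pv_cons2_evens a b t).2]
      simp

theorem main_lemma : ∀ (m : Nat) (fila : List Int), fila.length = m → fila ≠ [] →
    ∀ (phase : Bool) (acc : List Int),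
    pvALoop (if phase then fila else fila.tail ++ [fila.headI]) acc = pvBLoop fila phase acc := by
  intro m
  induction m using Nat.strong_induction_on with
  | _ m ih =>
    intro fila hlen hne phase acc
    match fila with
    | [] => exact absurd rfl hne
    | [x] => cases phase <;> simp [pvALoop, pvBLoop]
    | a :: b :: t =>
      have hm : m = t.length + 2 := by simp at hlen; omega
      have hsplit := pv_split_length (a :: b :: t)
      rw [pvBLoop]
      by_cases hp : phase = true
      · subst hp
        simp only [if_true]
        by_cases he : (a :: b :: t).length % 2 = 0
        · -- even round, phase stays true
          have h1 := pv_round_even ((a::b::t).length) (a::b::t) [] acc rfl he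
          simp only [List.append_nil, List.nil_append] at h1
          rw [h1]
          have hodd_ne : pvOdds (a :: b :: t) ≠ [] := by
            rw [(pv_cons2_evens a b t).2]; simp
          have h2 := ih (pvOdds (a::b::t)).length (by rw [hsplit.2, hlen]; omega)
            _ rfl hodd_ne true (acc ++ pvEvens (a::b::t))
          rw [if_pos rfl] at h2
          rw [h2]
          have h3 : ((a :: b :: t).length % 2 == 1) = false := by
            simp; omega
          rw [h3]
          simp
        · -- odd round, phase flips to false
          obtain ⟨u, z, huz'⟩ :=
            (List.eq_nil_or_concat (a :: b :: t)).resolve_left (by simp)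
          have huz : a :: b :: t = u ++ [z] := by
            rw [huz', List.concat_eq_append]
          have hu_even : u.length % 2 = 0 := by
            have : (a :: b :: t).length = u.length + 1 := by rw [huz]; simp
            omega
          have hu_len : 2 ≤ u.length := by
            have : (a :: b :: t).length = u.length + 1 := by rw [huz]; simp
            simp at this; omega
          have hEz := (pv_split_append u z).1
          have hOz := (pv_split_append u z).2
          rw [if_pos hu_even] at hEz
          rw [if_pos hu_even] at hOz
          have hOu_ne : pvOdds u ≠ [] := by
            have := (pv_split_length u).2
            intro h; rw [h] at this; simp at this; omega
          obtain ⟨o1, rest, ho⟩ := List.exists_cons_of_ne_nil hOu_ne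
          rw [huz, pv_round_even u.length u [z] acc rfl hu_even, ho,
              List.singleton_append, pvALoop]
          have hrest : rest.length + 1 = (pvOdds (u ++ [z])).length := by
            rw [hOz, ho]; simp
          have hlt : (pvOdds (u ++ [z])).length < m := by
            rw [huz] at hlen
            have h4 := (pv_split_length u).2
            rw [hOz, h4]
            simp at hlen
            omega
          have := ih (pvOdds (u ++ [z])).length hlt
            (pvOdds (u ++ [z])) rfl (by rw [hOz, ho]; simp) false
            (acc ++ pvEvens (u ++ [z]))
          simp only [Bool.false_eq_true, if_false] at this
          rw [hOz, ho] at this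
          simp only [List.tail_cons, List.headI_cons] at this
          rw [hEz] at this
          have hodd1 : ((u ++ [z]).length % 2 == 1) = true := by
            rw [← huz]; simp; omega
          rw [hodd1, hOz, ho, hEz]
          simp only [List.append_assoc] at this ⊢
          rw [this]
          simp
      · -- phase = false
        have hp' : phase = false := by cases phase <;> simp_all
        subst hp'
        simp only [Bool.false_eq_true, if_false, List.tail_cons, List.headI_cons]
        by_cases he : (a :: b :: t).length % 2 = 0
        · -- even round, phase stays false; actual queue (b::t) ++ [a]
          have hbt_odd : (b :: t).length % 2 = 0 → False := by simp at he ⊢; omega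
          have hE := (pv_split_append (b :: t) a).1
          have hO := (pv_split_append (b :: t) a).2
          rw [if_neg hbt_odd] at hE
          rw [if_neg hbt_odd] at hO
          have h1 := pv_round_even ((b::t).length + 1) ((b::t) ++ [a]) [] acc
            (by simp) (by simp at he ⊢; omega)
          simp only [List.append_nil, List.nil_append] at h1
          rw [h1, hE, hO]
          -- IH at pvEvens (a::b::t) = a :: pvOdds (b::t), phase false
          have hEa : pvEvens (a :: b :: t) = a :: pvOdds (b :: t) := by
            simp [pvEvens]
          have hOa : pvOdds (a :: b :: t) = pvEvens (b :: t) := by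
            simp [pvOdds]
          have := ih (pvEvens (a::b::t)).length (by rw [hsplit.1, hlen]; omega) _ rfl
            (by rw [hEa]; simp) false (acc ++ pvEvens (b :: t))
          simp only [Bool.false_eq_true, if_false] at this
          rw [hEa] at this
          simp only [List.tail_cons, List.headI_cons] at this
          rw [this, ← hEa]
          have : ((a :: b :: t).length % 2 == 1) = false := by simp; omega
          rw [this, ← hOa]
          simp
        · -- odd round, phase flips to true; actual queue (b::t) ++ [a], (b::t) even
          have hbt_even : (b :: t).length % 2 = 0 := by simp at he ⊢; omega
          rw [pv_round_even ((b::t).length) (b::t) [a] acc rfl hbt_even,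
              List.cons_append]
          have hEa : pvEvens (a :: b :: t) = a :: pvOdds (b :: t) := by
            simp [pvEvens]
          have hOa : pvOdds (a :: b :: t) = pvEvens (b :: t) := by
            simp [pvOdds]
          have := ih (pvEvens (a::b::t)).length (by rw [hsplit.1, hlen]; omega) _ rfl
            (by rw [hEa]; simp) true (acc ++ pvEvens (b :: t))
          simp only [if_true] at this
          rw [hEa] at this
          simp only [List.nil_append]
          rw [this, ← hEa]
          have : ((a :: b :: t).length % 2 == 1) = true := by simp; omega
          rw [this, ← hOa]
          simp

-- ===== VERDICT (by name: the statement is the Claim_ definition above) =====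
theorem jogar_cartas_fora_spec : Claim_equal_jogar_cartas_fora := by
  intro n _ hpre
  unfold Spec_jogar_cartas_fora jogar_cartas_fora jogar_cartas_fora_alt
  have hne : PySem.List.pyRange 1 (n + 1) 1 ≠ [] := by
    have : (PySem.List.pyRange 1 (n + 1) 1).length = (n + 1 - 1).toNat :=
      PySem.List.length_pyRange_one 1 (n + 1)
    intro h; rw [h] at this; simp at this
    unfold Pre_jogar_cartas_fora at hpre
    omega
  have := main_lemma (PySem.List.pyRange 1 (n + 1) 1).length _ rfl hne true []
  simpa using this
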